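-- pv_equiv track=rewrite | github.com/donaldmenezes/Solving-Problems-with-Python | goodrich/Chapter_1/C-1.14.py | oddproduct
-- ===== SOURCE A (Python) =====
-- def oddproduct(data):
--     """
--     assumes data is a list of integers
--     returns a boolean if the list has a distinct pair of numbers whose product is odd
--     """
--
--     datacopy = data.copy()
--     datacopy = set(datacopy)
--     odd = 0
--
--     for i in datacopy:
--         if i%2 != 0:
--             odd += 1
--         if odd == 2:
--             return True
--
--     return False
-- ===== SOURCE B (Python) =====
-- def oddproduct(data):
--     """
--     assumes data is a list of integers
--     returns a boolean if the list has a distinct pair of numbers whose product is odd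
--     """
--     first = None
--     for x in data:
--         if x % 2 != 0:
--             if first is None:
--                 first = x
--             elif x != first:
--                 return True
--     return False
-- ===== Notes on version B (the rewrite author's own statement) =====
-- stated objective: simpler
-- what changed: Replaces the set-copy plus odd-counter with a single pass over the raw list keeping only the first odd value seen as a sentinel, returning True on the first different odd.
import Mathlib
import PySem

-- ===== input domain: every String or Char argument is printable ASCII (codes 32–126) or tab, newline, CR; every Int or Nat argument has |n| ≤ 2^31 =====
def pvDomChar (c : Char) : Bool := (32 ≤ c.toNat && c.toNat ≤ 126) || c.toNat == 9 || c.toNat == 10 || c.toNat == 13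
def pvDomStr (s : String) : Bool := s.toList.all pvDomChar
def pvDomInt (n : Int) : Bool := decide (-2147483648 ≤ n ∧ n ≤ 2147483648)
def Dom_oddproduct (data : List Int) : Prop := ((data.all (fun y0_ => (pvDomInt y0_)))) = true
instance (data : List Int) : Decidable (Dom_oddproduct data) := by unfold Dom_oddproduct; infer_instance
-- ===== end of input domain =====

-- B replaces A's set-copy + odd-counter with a single pass keeping the first odd value
-- as a sentinel (objective: simpler).
-- ===== PORT A =====
-- loop 'for i in datacopy: …' with counter 'odd' and early 'return True'
def oddproductLoop : List Int → Int → Bool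
  | [], _ => false
  | i :: rest, odd =>
    let odd := if PySem.Int.mod i 2 != 0 then odd + 1 else odd
    if odd == 2 then true else oddproductLoop rest odd

def oddproduct (data : List Int) : Bool :=
  let datacopy := data
  let datacopy := PySem.Set.ofList datacopy
  oddproductLoop datacopy 0

-- ===== PORT B =====
-- one pass over data; 'first' is the first odd value seen (None = none)
def oddproductAltLoop : List Int → Option Int → Bool
  | [], _ => false
  | x :: rest, first =>
    if PySem.Int.mod x 2 != 0 then
      match first with
      | none => oddproductAltLoop rest (some x)
      | some f => if x != f then true else oddproductAltLoop rest (some f)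
    else oddproductAltLoop rest first

def oddproduct_alt (data : List Int) : Bool := oddproductAltLoop data none

-- ===== PRECONDITION & SPEC =====
def Spec_oddproduct (data : List Int) (out : Bool) : Prop := out = oddproduct_alt data
instance (data : List Int) (out : Bool) : Decidable (Spec_oddproduct data out) := by unfold Spec_oddproduct; infer_instance

-- ===== CLAIM (what is proved, stated in full; the proofs are below) =====
def Claim_equal_oddproduct : Prop := ∀ (data : List Int), Dom_oddproduct data → Spec_oddproduct data (oddproduct data)

-- ===== LEMMAS AND PROOFS =====

-- ===== VERDICT (by name: the statement is the Claim_ definition above) =====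
-- Both sides decide: "data contains two distinct odd elements".
def TwoOdds (l : List Int) : Prop :=
  ∃ a b, a ∈ l ∧ b ∈ l ∧ PySem.Int.mod a 2 ≠ 0 ∧ PySem.Int.mod b 2 ≠ 0 ∧ a ≠ b

theorem stepA_even (x : Int) (rest : List Int) (c : Int)
    (h : (PySem.Int.mod x 2 != 0) = false) :
    oddproductLoop (x :: rest) c = if (c == 2) = true then true else oddproductLoop rest c := by
  simp only [oddproductLoop, h, Bool.false_eq_true, if_false]

theorem stepA_odd (x : Int) (rest : List Int) (c : Int)
    (h : (PySem.Int.mod x 2 != 0) = true) :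
    oddproductLoop (x :: rest) c =
      if (c + 1 == 2) = true then true else oddproductLoop rest (c + 1) := by
  simp only [oddproductLoop, h, if_true]

-- A's loop over a Nodup list: true iff (counter already 1 and one more odd) or two distinct odds
theorem loopA_char (l : List Int) (c : Int) (hc : c = 0 ∨ c = 1) (hnd : l.Nodup) :
    oddproductLoop l c = true ↔
      (c = 1 ∧ ∃ a ∈ l, PySem.Int.mod a 2 ≠ 0) ∨ (c = 0 ∧ TwoOdds l) := by
  induction l generalizing c with
  | nil =>
    constructor
    · intro h; exact absurd h (by simp [oddproductLoop])
    · rintro (⟨-, a, ha, -⟩ | ⟨-, a, b, ha, -⟩) <;> exact absurd ha (List.not_mem_nil)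
  | cons x rest ih =>
    have hnd' : rest.Nodup := hnd.of_cons
    have hx : x ∉ rest := (List.nodup_cons.mp hnd).1
    cases hodd : (PySem.Int.mod x 2 != 0) with
    | true =>
      have hxo : PySem.Int.mod x 2 ≠ 0 := bne_iff_ne.mp hodd
      rcases hc with rfl | rfl
      · rw [stepA_odd x rest 0 hodd]
        have h2 : ((0 : Int) + 1 == 2) = false := by decide
        rw [h2, if_neg (by simp), zero_add]
        rw [ih 1 (Or.inr rfl) hnd']
        constructor
        · rintro (⟨-, a, ha, hao⟩ | ⟨h1, -⟩)
          · exact Or.inr ⟨rfl, x, a, List.mem_cons_self, List.mem_cons_of_mem _ ha, hxo, hao,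
              fun he => hx (he ▸ ha)⟩
          · exact absurd h1 (by decide)
        · rintro (⟨h0, -⟩ | ⟨-, a, b, ha, hb, hao, hbo, hab⟩)
          · exact absurd h0 (by decide)
          · rcases List.mem_cons.mp ha with rfl | ha'
            · rcases List.mem_cons.mp hb with rfl | hb'
              · exact absurd rfl hab
              · exact Or.inl ⟨rfl, b, hb', hbo⟩
            · exact Or.inl ⟨rfl, a, ha', hao⟩
      · rw [stepA_odd x rest 1 hodd]
        have h2 : ((1 : Int) + 1 == 2) = true := by decide
        rw [h2, if_pos rfl]
        constructor
        · intro _; exact Or.inl ⟨rfl, x, List.mem_cons_self, hxo⟩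
        · intro _; rfl
    | false =>
      have hxe : PySem.Int.mod x 2 = 0 := by
        by_contra hne
        rw [bne_iff_ne.mpr hne] at hodd
        exact Bool.true_eq_false.mp hodd
      rw [stepA_even x rest c hodd]
      have h2 : (c == 2) = false := by
        rcases hc with rfl | rfl <;> decide
      rw [h2, if_neg (by simp)]
      rw [ih c hc hnd']
      constructor
      · rintro (⟨h1, a, ha, hao⟩ | ⟨h0, a, b, ha, hb', hao, hbo, hab⟩)
        · exact Or.inl ⟨h1, a, List.mem_cons_of_mem _ ha, hao⟩
        · exact Or.inr ⟨h0, a, b, List.mem_cons_of_mem _ ha, List.mem_cons_of_mem _ hb',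
            hao, hbo, hab⟩
      · rintro (⟨h1, a, ha, hao⟩ | ⟨h0, a, b, ha, hb', hao, hbo, hab⟩)
        · rcases List.mem_cons.mp ha with rfl | ha'
          · exact absurd hxe hao
          · exact Or.inl ⟨h1, a, ha', hao⟩
        · rcases List.mem_cons.mp ha with rfl | ha'
          · exact absurd hxe hao
          rcases List.mem_cons.mp hb' with rfl | hb''
          · exact absurd hxe hbo
          · exact Or.inr ⟨h0, a, b, ha', hb'', hao, hbo, hab⟩

theorem stepB_even (x : Int) (rest : List Int) (first : Option Int)
    (h : (PySem.Int.mod x 2 != 0) = false) :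
    oddproductAltLoop (x :: rest) first = oddproductAltLoop rest first := by
  simp only [oddproductAltLoop, h, Bool.false_eq_true, if_false]

-- B's loop with the first odd stored as f: true iff some odd in the rest differs from f
theorem loopB_some (l : List Int) (f : Int) :
    oddproductAltLoop l (some f) = true ↔ ∃ x ∈ l, PySem.Int.mod x 2 ≠ 0 ∧ x ≠ f := by
  induction l with
  | nil =>
    constructor
    · intro h; exact absurd h (by simp [oddproductAltLoop])
    · rintro ⟨a, ha, -⟩; exact absurd ha (List.not_mem_nil)
  | cons x rest ih =>
    cases hodd : (PySem.Int.mod x 2 != 0) with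
    | true =>
      have hxo : PySem.Int.mod x 2 ≠ 0 := bne_iff_ne.mp hodd
      cases hxf : (x != f) with
      | true =>
        have hne : x ≠ f := bne_iff_ne.mp hxf
        simp only [oddproductAltLoop, hodd, if_true, hxf]
        constructor
        · intro _; exact ⟨x, List.mem_cons_self, hxo, hne⟩
        · intro _; trivial
      | false =>
        have heq : x = f := by
          by_contra hne
          rw [bne_iff_ne.mpr hne] at hxf
          exact Bool.true_eq_false.mp hxf
        simp only [oddproductAltLoop, hodd, if_true, hxf, Bool.false_eq_true, if_false]
        rw [ih]
        constructor
        · rintro ⟨y, hy, hyo, hyf⟩; exact ⟨y, List.mem_cons_of_mem _ hy, hyo, hyf⟩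
        · rintro ⟨y, hy, hyo, hyf⟩
          rcases List.mem_cons.mp hy with rfl | hy'
          · exact absurd heq hyf
          · exact ⟨y, hy', hyo, hyf⟩
    | false =>
      have hxe : PySem.Int.mod x 2 = 0 := by
        by_contra hne
        rw [bne_iff_ne.mpr hne] at hodd
        exact Bool.true_eq_false.mp hodd
      rw [stepB_even x rest _ hodd, ih]
      constructor
      · rintro ⟨y, hy, hyo, hyf⟩; exact ⟨y, List.mem_cons_of_mem _ hy, hyo, hyf⟩
      · rintro ⟨y, hy, hyo, hyf⟩
        rcases List.mem_cons.mp hy with rfl | hy'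
        · exact absurd hxe hyo
        · exact ⟨y, hy', hyo, hyf⟩

theorem loopB_none (l : List Int) :
    oddproductAltLoop l none = true ↔ TwoOdds l := by
  induction l with
  | nil =>
    constructor
    · intro h; exact absurd h (by simp [oddproductAltLoop])
    · rintro ⟨a, b, ha, -⟩; exact absurd ha (List.not_mem_nil)
  | cons x rest ih =>
    cases hodd : (PySem.Int.mod x 2 != 0) with
    | true =>
      have hxo : PySem.Int.mod x 2 ≠ 0 := bne_iff_ne.mp hodd
      simp only [oddproductAltLoop, hodd, if_true]
      rw [loopB_some]
      constructor
      · rintro ⟨y, hy, hyo, hyx⟩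
        exact ⟨x, y, List.mem_cons_self, List.mem_cons_of_mem _ hy, hxo, hyo,
          fun h => hyx h.symm⟩
      · rintro ⟨a, b, ha, hb, hao, hbo, hab⟩
        rcases List.mem_cons.mp ha with rfl | ha'
        · rcases List.mem_cons.mp hb with rfl | hb'
          · exact absurd rfl hab
          · exact ⟨b, hb', hbo, fun h => hab h.symm⟩
        · rcases List.mem_cons.mp hb with rfl | hb'
          · exact ⟨a, ha', hao, hab⟩
          · by_cases hax : a = x
            · exact ⟨b, hb', hbo, fun h => hab (hax.trans h.symm)⟩
            · exact ⟨a, ha', hao, hax⟩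
    | false =>
      have hxe : PySem.Int.mod x 2 = 0 := by
        by_contra hne
        rw [bne_iff_ne.mpr hne] at hodd
        exact Bool.true_eq_false.mp hodd
      rw [stepB_even x rest _ hodd, ih]
      unfold TwoOdds
      constructor
      · rintro ⟨a, b, ha, hb', hao, hbo, hab⟩
        exact ⟨a, b, List.mem_cons_of_mem _ ha, List.mem_cons_of_mem _ hb', hao, hbo, hab⟩
      · rintro ⟨a, b, ha, hb', hao, hbo, hab⟩
        rcases List.mem_cons.mp ha with rfl | ha'
        · exact absurd hxe hao
        rcases List.mem_cons.mp hb' with rfl | hb''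
        · exact absurd hxe hbo
        · exact ⟨a, b, ha', hb'', hao, hbo, hab⟩

theorem twoOdds_ofList (data : List Int) :
    TwoOdds (PySem.Set.ofList data) ↔ TwoOdds data := by
  unfold TwoOdds
  simp only [PySem.Set.mem_ofList]

-- ===== VERDICT (by name: the statement is the Claim_ definition above) =====
theorem oddproduct_spec : Claim_equal_oddproduct := by
  intro data _
  unfold Spec_oddproduct oddproduct oddproduct_alt
  have hA := loopA_char (PySem.Set.ofList data) 0 (Or.inl rfl) (PySem.Set.nodup_ofList data)
  have hB := loopB_none data
  rcases hb : oddproductAltLoop data none with _ | _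
  · rcases ha : oddproductLoop (PySem.Set.ofList data) 0 with _ | _
    · rfl
    · exfalso
      rcases hA.mp ha with ⟨h0, -⟩ | ⟨-, h2⟩
      · exact absurd h0 (by decide)
      · exact absurd (hB.mpr ((twoOdds_ofList data).mp h2)) (by simp [hb])
  · rcases ha : oddproductLoop (PySem.Set.ofList data) 0 with _ | _
    · exfalso
      have h2 := (twoOdds_ofList data).mpr (hB.mp hb)
      exact absurd (hA.mpr (Or.inr ⟨rfl, h2⟩)) (by simp [ha])
    · rfl
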